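-- pv_equiv track=rewrite | github.com/yash98/Color-Quantization-Color-Transfer | src/quantize/median_cut.py | select_channel
-- ===== SOURCE A (Python) =====
-- def select_channel(bucket):
-- 	max_r = 255
-- 	max_g = 255
-- 	max_b = 255
-- 	min_r = 0
-- 	min_g = 0
-- 	min_b = 0
--
-- 	for r, g, b in bucket:
-- 		max_r = max(max_r, r)
-- 		max_g = max(max_g, g)
-- 		max_b = max(max_b, b)
-- 		min_r = min(min_r, r)
-- 		min_g = min(min_g, g)
-- 		min_b = min(min_b, b)
--
-- 	ranges = [max_r - min_r, max_g - min_g, max_b - min_b]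
-- 	return ranges.index(max(ranges))
-- ===== SOURCE B (Python) =====
-- def select_channel(bucket):
-- 	ranges = []
-- 	for ch in range(3):
-- 		s = sorted([0, 255] + [p[ch] for p in bucket])
-- 		ranges.append(s[-1] - s[0])
-- 	if ranges[0] >= ranges[1] and ranges[0] >= ranges[2]:
-- 		return 0
-- 	if ranges[1] >= ranges[2]:
-- 		return 1
-- 	return 2
-- ===== Notes on version B (the rewrite author's own statement) =====
-- stated objective: alternative
-- what changed: B replaces A's fused single pass over six running min/max accumulators with a sort-based method: each channel's seeded value list ([0,255]+values) is sorted and its range read off as last-minus-first, and the final ranges.index(max(ranges)) is replaced by an explicit first-tie comparison chain over the three ranges.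
import Mathlib
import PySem

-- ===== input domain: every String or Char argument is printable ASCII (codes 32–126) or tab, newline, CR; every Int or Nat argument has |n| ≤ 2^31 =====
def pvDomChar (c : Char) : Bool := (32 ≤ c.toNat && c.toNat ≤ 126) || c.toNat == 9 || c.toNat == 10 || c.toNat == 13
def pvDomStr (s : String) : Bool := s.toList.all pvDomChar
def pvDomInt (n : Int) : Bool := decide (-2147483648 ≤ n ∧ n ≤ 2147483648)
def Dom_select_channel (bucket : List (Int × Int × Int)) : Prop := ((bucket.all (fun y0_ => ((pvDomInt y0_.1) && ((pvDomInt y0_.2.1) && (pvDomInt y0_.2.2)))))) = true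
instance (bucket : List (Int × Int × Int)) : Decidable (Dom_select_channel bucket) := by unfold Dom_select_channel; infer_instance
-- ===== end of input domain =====

-- B computes each channel's range by sorting the seeded channel values and reading last-minus-first, and picks the argmax by an explicit comparison chain, instead of A's fused six-accumulator pass with ranges.index(max(ranges)); objective: alternative.
-- ===== PORT A =====
def select_channel (bucket : List (Int × Int × Int)) : Int :=
  let st := bucket.foldl
    (fun (s : Int × Int × Int × Int × Int × Int) p =>
      (max s.1 p.1, max s.2.1 p.2.1, max s.2.2.1 p.2.2,
       min s.2.2.2.1 p.1, min s.2.2.2.2.1 p.2.1, min s.2.2.2.2.2 p.2.2))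
    (255, 255, 255, 0, 0, 0)
  let ranges : List Int :=
    [st.1 - st.2.2.2.1, st.2.1 - st.2.2.2.2.1, st.2.2.1 - st.2.2.2.2.2]
  -- ranges.index(max(ranges)); ranges is nonempty so the defaults are unreachable
  match PySem.List.max? ranges (fun x => x) with
  | some m => ((PySem.List.index? ranges m).getD 0 : Nat)
  | none => 0

-- ===== PORT B =====
-- dynamic tuple index p[ch] for ch ∈ {0,1,2}
def pvGetCh (p : Int × Int × Int) (ch : Int) : Int :=
  if ch = 0 then p.1 else if ch = 1 then p.2.1 else p.2.2

def select_channel_alt (bucket : List (Int × Int × Int)) : Int :=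
  let ranges : List Int :=
    (PySem.List.pyRange 0 3 1).foldl
      (fun rs ch =>
        let s := PySem.List.sorted ([0, 255] ++ bucket.map (fun p => pvGetCh p ch)) (fun x => x) false
        rs ++ [PySem.List.pyGetD s (-1) 0 - PySem.List.pyGetD s 0 0]) []
  if PySem.List.pyGetD ranges 0 0 ≥ PySem.List.pyGetD ranges 1 0 ∧
     PySem.List.pyGetD ranges 0 0 ≥ PySem.List.pyGetD ranges 2 0 then 0
  else if PySem.List.pyGetD ranges 1 0 ≥ PySem.List.pyGetD ranges 2 0 then 1
  else 2

-- ===== PRECONDITION & SPEC =====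
def Spec_select_channel (bucket : List (Int × Int × Int)) (out : Int) : Prop := out = select_channel_alt bucket
instance (bucket : List (Int × Int × Int)) (out : Int) : Decidable (Spec_select_channel bucket out) := by unfold Spec_select_channel; infer_instance

-- ===== CLAIM (what is proved, stated in full; the proofs are below) =====
def Claim_equal_select_channel : Prop := ∀ (bucket : List (Int × Int × Int)), Dom_select_channel bucket → Spec_select_channel bucket (select_channel bucket)

-- ===== LEMMAS AND PROOFS =====

-- fold-min facts specific to the seeded channel lists
theorem foldl_min_le_init (l : List Int) (a : Int) : l.foldl min a ≤ a := by
  induction l generalizing a with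
  | nil => simp
  | cons x t ih => exact le_trans (ih (min a x)) (min_le_left _ _)

theorem foldl_min_le_mem (l : List Int) (a x : Int) (hx : x ∈ l) : l.foldl min a ≤ x := by
  induction l generalizing a with
  | nil => cases hx
  | cons y t ih =>
    rcases List.mem_cons.1 hx with h | h
    · subst h; exact le_trans (foldl_min_le_init t _) (min_le_right _ _)
    · exact ih _ h

theorem foldl_min_mem_or (l : List Int) (a : Int) : l.foldl min a = a ∨ l.foldl min a ∈ l := by
  induction l generalizing a with
  | nil => left; rfl
  | cons x t ih =>
    simp only [List.foldl]
    rcases ih (min a x) with h | h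
    · rcases min_cases a x with ⟨he, _⟩ | ⟨he, _⟩
      · left; rw [h, he]
      · right; rw [h, he]; simp
    · right; exact List.mem_cons_of_mem _ h

theorem foldl_max_le_init (l : List Int) (a : Int) : a ≤ l.foldl max a := by
  induction l generalizing a with
  | nil => simp
  | cons x t ih => exact le_trans (le_max_left _ _) (ih (max a x))

theorem foldl_max_le_mem (l : List Int) (a x : Int) (hx : x ∈ l) : x ≤ l.foldl max a := by
  induction l generalizing a with
  | nil => cases hx
  | cons y t ih =>
    rcases List.mem_cons.1 hx with h | h
    · subst h; exact le_trans (le_max_right _ _) (foldl_max_le_init t _)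
    · exact ih _ h

theorem foldl_max_mem_or (l : List Int) (a : Int) : l.foldl max a = a ∨ l.foldl max a ∈ l := by
  induction l generalizing a with
  | nil => left; rfl
  | cons x t ih =>
    simp only [List.foldl]
    rcases ih (max a x) with h | h
    · rcases max_cases a x with ⟨he, _⟩ | ⟨he, _⟩
      · left; rw [h, he]
      · right; rw [h, he]; simp
    · right; exact List.mem_cons_of_mem _ h

-- head of the sorted seeded list is the running-min of A, last is the running-max
theorem sorted_head_eq_foldl_min (c : List Int) :
    PySem.List.pyGetD (PySem.List.sorted ((0 : Int) :: 255 :: c) (fun x => x) false) 0 0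
      = c.foldl min 0 := by
  have hne : PySem.List.sorted ((0 : Int) :: 255 :: c) (fun x => x) false ≠ [] := by
    intro h
    rw [PySem.List.sorted_eq_nil_iff] at h
    exact List.cons_ne_nil _ _ h
  obtain ⟨m, t, hmt⟩ := List.exists_cons_of_ne_nil hne
  have hmem : m ∈ (0 : Int) :: 255 :: c := by
    have : m ∈ PySem.List.sorted ((0 : Int) :: 255 :: c) (fun x => x) false := by
      rw [hmt]; exact List.mem_cons_self
    exact (PySem.List.mem_sorted _ _ _ _).1 this
  have hle : ∀ y ∈ (0 : Int) :: 255 :: c, m ≤ y :=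
    PySem.List.key_head_sorted_le _ (fun x : Int => x) hmt
  have h0 : m ≤ 0 := hle 0 (by simp)
  rw [hmt, PySem.List.pyGetD_zero_cons]
  apply le_antisymm
  · rcases foldl_min_mem_or c 0 with h | h
    · rw [h]; exact h0
    · exact hle _ (by simp [h])
  · rcases List.mem_cons.1 hmem with h | h
    · subst h; exact foldl_min_le_init c 0
    · rcases List.mem_cons.1 h with h | h
      · exact le_trans (foldl_min_le_init c 0) (by omega)
      · exact foldl_min_le_mem c 0 m h

theorem sorted_last_eq_foldl_max (c : List Int) :
    PySem.List.pyGetD (PySem.List.sorted ((0 : Int) :: 255 :: c) (fun x => x) false) (-1) 0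
      = c.foldl max 255 := by
  have hne : PySem.List.sorted ((0 : Int) :: 255 :: c) (fun x => x) false ≠ [] := by
    intro h
    rw [PySem.List.sorted_eq_nil_iff] at h
    exact List.cons_ne_nil _ _ h
  rw [PySem.List.pyGetD_neg_one _ _ hne]
  have hpair : (PySem.List.sorted ((0 : Int) :: 255 :: c) (fun x => x) false).Pairwise
      (fun a b : Int => a ≤ b) :=
    PySem.List.sorted_pairwise ((0 : Int) :: 255 :: c) (fun x : Int => x)
  have hrevne : (PySem.List.sorted ((0 : Int) :: 255 :: c) (fun x => x) false).reverse ≠ [] :=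
    fun h => hne (List.reverse_eq_nil_iff.mp h)
  obtain ⟨M, t, hMt⟩ := List.exists_cons_of_ne_nil hrevne
  have hsplit : PySem.List.sorted ((0 : Int) :: 255 :: c) (fun x => x) false = t.reverse ++ [M] := by
    rw [← List.reverse_reverse (PySem.List.sorted ((0 : Int) :: 255 :: c) (fun x => x) false), hMt]
    simp
  have hlastM : (PySem.List.sorted ((0 : Int) :: 255 :: c) (fun x => x) false).getLast hne = M := by
    have h1 := List.getLast?_eq_some_getLast hne
    have h2 : (PySem.List.sorted ((0 : Int) :: 255 :: c) (fun x => x) false).getLast? = some M := by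
      rw [hsplit]; exact List.getLast?_concat
    exact Option.some_inj.1 (h1.symm.trans h2)
  have hrevpair := List.pairwise_reverse.mpr hpair
  rw [hMt] at hrevpair
  have hge : ∀ y ∈ (0 : Int) :: 255 :: c, y ≤ M := by
    intro y hy
    have : y ∈ M :: t := by
      rw [← hMt, List.mem_reverse]
      exact (PySem.List.mem_sorted ((0 : Int) :: 255 :: c) (fun x : Int => x) false y).2 hy
    rcases List.mem_cons.1 this with h | h
    · omega
    · exact (List.pairwise_cons.1 hrevpair).1 y h
  have hmemM : M ∈ (0 : Int) :: 255 :: c := by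
    have hMrev : M ∈ (PySem.List.sorted ((0 : Int) :: 255 :: c) (fun x => x) false).reverse := by
      rw [hMt]; exact List.mem_cons_self
    exact (PySem.List.mem_sorted ((0 : Int) :: 255 :: c) (fun x : Int => x) false M).1
      (List.mem_reverse.mp hMrev)
  have h255 : (255 : Int) ≤ M := hge 255 (by simp)
  rw [hlastM]
  apply le_antisymm
  · rcases List.mem_cons.1 hmemM with h | h
    · rw [h]; exact le_trans (by norm_num : (0:Int) ≤ 255) (foldl_max_le_init c 255)
    · rcases List.mem_cons.1 h with h | h
      · subst h; exact foldl_max_le_init c 255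
      · exact foldl_max_le_mem c 255 M h
  · rcases foldl_max_mem_or c 255 with h | h
    · rw [h]; exact h255
    · exact hge _ (by simp [h])

-- A's fused fold over six accumulators splits into six per-column folds
theorem fold6 (bucket : List (Int × Int × Int)) :
    ∀ (a b c d e f : Int),
      bucket.foldl
        (fun (s : Int × Int × Int × Int × Int × Int) p =>
          (max s.1 p.1, max s.2.1 p.2.1, max s.2.2.1 p.2.2,
           min s.2.2.2.1 p.1, min s.2.2.2.2.1 p.2.1, min s.2.2.2.2.2 p.2.2))
        (a, b, c, d, e, f)
      = ((bucket.map (·.1)).foldl max a, (bucket.map (·.2.1)).foldl max b,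
         (bucket.map (·.2.2)).foldl max c, (bucket.map (·.1)).foldl min d,
         (bucket.map (·.2.1)).foldl min e, (bucket.map (·.2.2)).foldl min f) := by
  induction bucket with
  | nil => intro a b c d e f; rfl
  | cons p t ih => intro a b c d e f; simp only [List.foldl, List.map]; exact ih _ _ _ _ _ _

-- the final step: first-tie argmax of a 3-list, A via ranges.index(max(ranges)), B via the comparison chain
theorem argmax3 (r0 r1 r2 : Int) :
    (match PySem.List.max? [r0, r1, r2] (fun x => x) with
      | some m => ((PySem.List.index? [r0, r1, r2] m).getD 0 : Nat)
      | none => (0 : Int))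
    = (if r0 ≥ r1 ∧ r0 ≥ r2 then (0 : Int) else if r1 ≥ r2 then 1 else 2) := by
  simp only [PySem.List.max?, PySem.List.index?, List.foldl, List.idxOf?, List.findIdx?,
    List.findIdx?.go]
  norm_num
  split_ifs <;> simp_all <;> split_ifs <;> simp_all <;> first | omega | (split_ifs <;> simp_all)

-- ===== VERDICT (by name: the statement is the Claim_ definition above) =====
theorem select_channel_spec : Claim_equal_select_channel := by
  intro bucket _
  unfold Spec_select_channel select_channel select_channel_alt
  have hrange : PySem.List.pyRange 0 3 1 = [0, 1, 2] := by decide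
  simp only [hrange, List.foldl, List.nil_append]
  simp only [fold6]
  have g0 : ∀ p : Int × Int × Int, pvGetCh p 0 = p.1 := by intro p; rfl
  have g1 : ∀ p : Int × Int × Int, pvGetCh p 1 = p.2.1 := by intro p; rfl
  have g2 : ∀ p : Int × Int × Int, pvGetCh p 2 = p.2.2 := by intro p; simp [pvGetCh]
  simp only [g0, g1, g2]
  have hc : ∀ c : List Int, ([0, 255] ++ c : List Int) = 0 :: 255 :: c := by intro c; rfl
  simp only [hc, sorted_head_eq_foldl_min, sorted_last_eq_foldl_max]
  simp only [List.cons_append, List.nil_append]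
  have p1 : ∀ (a b c : Int), PySem.List.pyGetD [a, b, c] 1 0 = b := by intro a b c; rfl
  have p2 : ∀ (a b c : Int), PySem.List.pyGetD [a, b, c] 2 0 = c := by intro a b c; rfl
  simp only [PySem.List.pyGetD_zero_cons, p1, p2]
  rw [argmax3]
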